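-- pv_equiv track=rewrite | github.com/katelynrm/algorithms | coding_problems/int_count.py | int_count
-- ===== SOURCE A (Python) =====
-- def int_count(list_):
--     result = dict()
--     for i in list_:
--         if i not in result:
--             result[i] = 1
--         else:
--             result[i] = result[i] + 1
--     for k, v in result.items():
--         if v == 1:
--             return k
-- ===== SOURCE B (Python) =====
-- def int_count(list_):
--     # positional test: x occurs exactly once iff its first occurrence from the
--     # front and its first occurrence from the back are the same position
--     n = len(list_)
--     rev = list_[::-1]
--     for x in list_:
--         if list_.index(x) + rev.index(x) == n - 1:
--             return x
--     return None
-- ===== Notes on version B (the rewrite author's own statement) =====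
-- stated objective: alternative
-- what changed: B drops counting altogether and uses a positional characterisation: an element occurs exactly once iff its first occurrence from the front and from the back coincide, tested as list_.index(x) + rev.index(x) == n - 1 over a precomputed reversal.
import Mathlib
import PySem

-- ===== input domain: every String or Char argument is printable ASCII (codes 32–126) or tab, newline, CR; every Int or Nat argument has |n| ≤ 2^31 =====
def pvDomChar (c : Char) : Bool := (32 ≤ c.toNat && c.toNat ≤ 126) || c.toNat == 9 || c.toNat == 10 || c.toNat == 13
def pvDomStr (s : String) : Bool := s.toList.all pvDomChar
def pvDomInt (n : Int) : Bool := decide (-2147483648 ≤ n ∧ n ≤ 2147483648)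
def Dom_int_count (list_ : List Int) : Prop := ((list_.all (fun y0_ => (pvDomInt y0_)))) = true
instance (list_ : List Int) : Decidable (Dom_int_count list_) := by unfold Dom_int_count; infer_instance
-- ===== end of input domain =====

-- B replaces A's frequency dictionary by a positional test: an element is unique iff its
-- first occurrences from the front and from the back coincide (index sums to n-1); objective: alternative.

-- ===== PORT A =====
-- first loop body: 'if i not in result: result[i] = 1 else: result[i] = result[i] + 1'
-- ('result[i]' is read in the branch where the key is present, so getD with default 0 is exact there)
def intCountStep (d : PySem.Dict Int Int) (i : Int) : PySem.Dict Int Int :=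
  if d.contains i = false then d.insert i 1
  else d.insert i (d.getD i 0 + 1)

-- second loop: 'for k, v in result.items(): if v == 1: return k' (falls off the end → None)
def intCountFind : List (Int × Int) → Option Int
  | [] => none
  | (k, v) :: rest => if v == 1 then some k else intCountFind rest

def int_count (list_ : List Int) : Option Int :=
  intCountFind (list_.foldl intCountStep PySem.Dict.empty).items

-- ===== PORT B =====
-- 'for x in list_: if list_.index(x) + rev.index(x) == n - 1: return x'; 'return None'.
-- Python's .index raises ValueError when absent; here x is drawn from list_ itself, so both
-- index? calls are always some — the fallthrough 'none' branch is unreachable.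
def intCountAltGo (full rev : List Int) (n : Nat) : List Int → Option Int
  | [] => none
  | x :: rest =>
    match PySem.List.index? full x, PySem.List.index? rev x with
    | some i, some j =>
        if (i : Int) + (j : Int) == (n : Int) - 1 then some x
        else intCountAltGo full rev n rest
    | _, _ => none

-- rev = list_[::-1]; PySem.List.slice?_none_none_neg_one : slice? xs none none (-1) = some xs.reverse
def int_count_alt (list_ : List Int) : Option Int :=
  intCountAltGo list_ list_.reverse list_.length list_

-- ===== PRECONDITION & SPEC =====
def Spec_int_count (list_ : List Int) (out : Option Int) : Prop := out = int_count_alt list_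
instance (list_ : List Int) (out : Option Int) : Decidable (Spec_int_count list_ out) := by unfold Spec_int_count; infer_instance

-- ===== CLAIM (what is proved, stated in full; the proofs are below) =====
def Claim_equal_int_count : Prop := ∀ (list_ : List Int), Dom_int_count list_ → Spec_int_count list_ (int_count list_)

-- ===== LEMMAS AND PROOFS =====

-- A's second loop is find? on the items, projected to the key
lemma intCountFind_eq (l : List (Int × Int)) :
    intCountFind l = (l.find? (fun p => p.2 == 1)).map (·.1) := by
  induction l with
  | nil => rfl
  | cons p rest ih =>
    obtain ⟨k, v⟩ := p
    by_cases h : v = 1 <;> simp [intCountFind, h, ih]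

-- A's first loop builds Counter(list_)
lemma foldl_intCountStep (l : List Int) :
    l.foldl intCountStep PySem.Dict.empty = PySem.Dict.counter l := by
  rw [← PySem.Dict.foldl_insert_getD_add_one_eq_counter]
  apply PySem.List.foldl_congr_mem
  intro d i _
  unfold intCountStep
  by_cases h : d.contains i = false
  · simp [h, PySem.Dict.getD_of_not_contains d 0 h]
  · simp [h]

-- first match over the deduplicated (first-occurrence) list = first match over the list itself
lemma find?_ofList (p : Int → Bool) (l : List Int) :
    (PySem.Set.ofList l).find? p = l.find? p := by
  induction l with
  | nil => rfl
  | cons x t ih =>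
    rw [PySem.Set.ofList_cons]
    by_cases hx : p x = true
    · simp [List.find?, hx]
    · have hx' : p x = false := by simpa using hx
      have hfix : (fun a => decide (((fun y => !(y == x)) a) = true ∧ p a = true)) = p := by
        funext a
        by_cases ha : a = x
        · subst ha; simp [hx']
        · simp [ha]
      simp only [List.find?, hx]
      calc ((PySem.Set.ofList t).discard x).find? p
          = ((PySem.Set.ofList t).filter (fun y => !(y == x))).find? p := by
            simp [PySem.Set.discard]
        _ = (PySem.Set.ofList t).find? p := by rw [List.find?_filter, hfix]
        _ = t.find? p := ih

-- the positional characterisation: first-from-front + first-from-back = n-1  ↔  count = 1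
lemma index_sum_iff_count_one (l : List Int) (x : Int) (i j : Nat)
    (hi : PySem.List.index? l x = some i) (hj : PySem.List.index? l.reverse x = some j) :
    ((i : Int) + (j : Int) = (l.length : Int) - 1 ↔ l.count x = 1) := by
  rw [PySem.List.index?_eq_some_iff] at hi
  obtain ⟨pre, suf, hl, hlen, hpre⟩ := hi
  subst hl
  have hrev : (pre ++ x :: suf).reverse = suf.reverse ++ x :: pre.reverse := by simp
  by_cases hmem : x ∈ suf
  · -- duplicate: j lands inside suf.reverse, so the sum is short; count ≥ 2
    rw [hrev, PySem.List.index?_append_of_mem _ (by simpa using hmem)] at hj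
    rw [PySem.List.index?_eq_some_iff] at hj
    obtain ⟨p2, s2, hs, hlen2, _⟩ := hj
    have hjlt : j < suf.length := by
      have := congrArg List.length hs
      simp at this
      omega
    constructor
    · intro h
      exfalso
      have : pre.length + suf.length + 1 = (pre ++ x :: suf).length := by simp; omega
      simp at h
      omega
    · intro h
      exfalso
      have hc : (pre ++ x :: suf).count x = pre.count x + (1 + suf.count x) := by
        simp [List.count_append, List.count_cons_self]
        omega
      have : 0 < suf.count x := List.count_pos_iff.mpr hmem
      omega
  · -- unique: j = suf.length, the sum is exactly n-1; count = 1
    have hj' : PySem.List.index? (suf.reverse ++ x :: pre.reverse) x = some suf.reverse.length := by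
      rw [PySem.List.index?_eq_some_iff]
      exact ⟨suf.reverse, pre.reverse, rfl, rfl, by simpa using hmem⟩
    rw [hrev, hj'] at hj
    have hjv : j = suf.length := by simpa using hj.symm
    constructor
    · intro _
      have h1 : pre.count x = 0 := List.count_eq_zero.mpr hpre
      have h2 : suf.count x = 0 := List.count_eq_zero.mpr hmem
      simp [List.count_append, List.count_cons_self, h1, h2]
    · intro _
      subst hjv hlen
      simp
      omega

-- B's loop is find? with the count-equals-one predicate, for sublists of full
lemma intCountAltGo_eq (full : List Int) :
    ∀ sub : List Int, (∀ x ∈ sub, x ∈ full) →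
      intCountAltGo full full.reverse full.length sub
        = sub.find? (fun x => full.count x == 1) := by
  intro sub hsub
  induction sub with
  | nil => rfl
  | cons x rest ih =>
    have hx : x ∈ full := hsub x (List.mem_cons_self)
    obtain ⟨i, hi⟩ := Option.isSome_iff_exists.mp
      ((PySem.List.index?_isSome_iff full x).mpr hx)
    obtain ⟨j, hj⟩ := Option.isSome_iff_exists.mp
      ((PySem.List.index?_isSome_iff full.reverse x).mpr (by simpa using hx : x ∈ full.reverse))
    have hkey := index_sum_iff_count_one full x i j hi hj
    rw [List.find?_cons]
    rw [PySem.List.index?_eq_idxOf?] at hi hj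
    simp only [intCountAltGo, PySem.List.index?_eq_idxOf?, hi, hj]
    by_cases h : List.count x full = 1
    · have hs : (i : Int) + (j : Int) = (full.length : Int) - 1 := hkey.mpr h
      simp [hs, h]
    · have hs : ¬((i : Int) + (j : Int) = (full.length : Int) - 1) := fun hs => h (hkey.mp hs)
      have h' : (List.count x full == 1) = false := by simpa using h
      simp only [beq_iff_eq, if_neg hs, h']
      exact ih (fun y hy => hsub y (List.mem_cons_of_mem _ hy))

-- ===== VERDICT (by name: the statement is the Claim_ definition above) =====
theorem int_count_spec : Claim_equal_int_count := by
  unfold Claim_equal_int_count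
  intro l _
  unfold Spec_int_count int_count int_count_alt
  rw [foldl_intCountStep, intCountFind_eq, PySem.Dict.items_counter,
    List.find?_map, intCountAltGo_eq l l (fun _ h => h),
    ← find?_ofList (fun x => l.count x == 1)]
  have : ((fun p : Int × Int => p.2 == 1) ∘ fun k => (k, (List.count k l : Int)))
      = fun x => l.count x == 1 := by
    funext i
    simp [Function.comp, List.count]
  rw [this]
  generalize (PySem.Set.ofList l).find? (fun x => l.count x == 1) = o
  cases o <;> rfl
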